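-- pv_equiv track=rewrite | github.com/tomer-reiter/advent-of-code | puzzle_13_revised.py | has_horizontal_sym
-- ===== SOURCE A (Python) =====
-- def d(s_1, s_2):
--     return len([k for k in range(len(s_1)) if s_1[k] != s_2[k]])
--
-- def has_horizontal_sym(grid, distance):
--     rows_string = "".join(row for row in grid)
--     prefix_reversed, suffix = "", rows_string
--     for i in range(len(grid) - 1):
--         prefix_reversed = grid[i] + prefix_reversed
--         suffix = suffix[len(grid[i]):]
--         common_length = min(len(prefix_reversed), len(suffix))
--         if d(prefix_reversed[:common_length], suffix[:common_length]) == distance: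
--             return True, i + 1
--     return False, 0
-- ===== SOURCE B (Python) =====
-- def _split_matches(grid, i, distance):
--     # Does the reflection line below row i have exactly `distance` mismatches?
--     # top = grid[i], grid[i-1], ..., grid[0]; bottom = grid[i+1], ...; compared
--     # character-by-character up to the common length with integer cursors (no
--     # concatenated string is built), bailing out as soon as the count exceeds distance.
--     total, ti, tj, bi, bj = 0, i, 0, i + 1, 0
--     while ti >= 0 and bi < len(grid):
--         if total > distance:
--             return False
--         a, b = grid[ti], grid[bi]
--         if tj == 0 and bj == 0 and a == b:
--             ti, bi = ti - 1, bi + 1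
--         elif tj == len(a):
--             ti, tj = ti - 1, 0
--         elif bj == len(b):
--             bi, bj = bi + 1, 0
--         else:
--             m = min(len(a) - tj, len(b) - bj)
--             sa, sb = a[tj:tj + m], b[bj:bj + m]
--             if sa != sb:
--                 total += sum(map(str.__ne__, sa, sb))
--             tj += m
--             bj += m
--     return total == distance
--
-- def has_horizontal_sym(grid, distance):
--     for i in range(len(grid) - 1):
--         if _split_matches(grid, i, distance):
--             return True, i + 1
--     return False, 0
-- ===== Notes on version B (the rewrite author's own statement) =====
-- stated objective: alternative
-- what changed: Replaces A's growing prefix/suffix string accumulators and per-split slice-and-compare (helper d over sliced copies of the concatenation) by a segment-merge: four integer cursors walk the row list directly (top rows descending, bottom rows ascending), comparing aligned row segments, skipping equal row pairs wholesale, and bailing out of a split as soon as its mismatch count exceeds distance, so the concatenated halves are never built.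
import Mathlib
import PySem

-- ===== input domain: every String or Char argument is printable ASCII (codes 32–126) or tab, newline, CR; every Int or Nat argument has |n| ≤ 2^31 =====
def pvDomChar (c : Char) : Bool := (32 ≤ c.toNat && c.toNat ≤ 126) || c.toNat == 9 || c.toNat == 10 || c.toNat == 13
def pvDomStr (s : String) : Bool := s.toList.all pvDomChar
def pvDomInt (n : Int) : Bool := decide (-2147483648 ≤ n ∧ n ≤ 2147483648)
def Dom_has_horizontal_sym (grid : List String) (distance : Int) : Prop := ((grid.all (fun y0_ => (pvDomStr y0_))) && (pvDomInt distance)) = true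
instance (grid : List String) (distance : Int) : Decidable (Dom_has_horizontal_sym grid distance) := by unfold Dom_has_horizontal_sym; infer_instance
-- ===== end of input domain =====

-- B replaces A's growing string accumulators and per-split slicing by a cursor-based segment
-- merge over the row list with an early cutoff once a split's mismatch count exceeds distance
-- (no concatenated string is built); objective: alternative.

-- ===== PORT A =====
-- d(s_1, s_2) = len([k for k in range(len(s_1)) if s_1[k] != s_2[k]])  (on List Char)
def dChars (s1 s2 : List Char) : Int :=
  (((PySem.List.pyRange 0 (s1.length : Int) 1).filter
      (fun k => PySem.List.pyGet? s1 k != PySem.List.pyGet? s2 k)).length : Int)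

-- the loop 'for i in range(len(grid)-1)' with early return, state (prefix_reversed, suffix)
def loopA (grid : List (List Char)) (distance : Int) :
    List Int → List Char → List Char → Bool × Int
  | [], _, _ => (false, 0)
  | i :: rest, pref, suff =>
      let row := (PySem.List.pyGet? grid i).getD []      -- grid[i]; i is in range here
      let pref' := row ++ pref
      let suff' := suff.drop row.length                   -- suffix[len(grid[i]):], start ≥ 0: exact
      let cl := min pref'.length suff'.length
      if dChars (pref'.take cl) (suff'.take cl) = distance then (true, i + 1)  -- s[:cl] with 0 ≤ cl: take
      else loopA grid distance rest pref' suff'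

def has_horizontal_sym (grid : List String) (distance : Int) : Bool × Int :=
  let g := grid.map String.toList
  loopA g distance (PySem.List.pyRange 0 ((g.length : Int) - 1) 1) [] g.flatten

-- ===== PORT B =====
def sumLen (l : List (List Char)) : Nat := (l.map List.length).sum

-- the while loop of _split_matches: cursors (ti, tj) in the top half (rows descending), (bi, bj)
-- in the bottom half (rows ascending), running mismatch total, bailing out with False as soon as
-- total exceeds distance, and returning total == distance when either half is exhausted.  ti is
-- Int (it reaches -1); tj, bi, bj are the Nat cursors (Python keeps them ints but they are never
-- negative).  The two row-exhausted tests are 'tj == len(a)' / 'bj == len(b)' in Python; since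
-- the cursors never exceed their row (tj ≤ len a, bj ≤ len b, see mloop_eq), '≤' is written for
-- them.  fuel is a totality guard only: it starts at an upper bound on the number of loop
-- iterations (mloop_fuel below, shown sufficient in mloop_eq); its exhaustion case repeats the
-- loop-exit return and is never reached from mloop_fuel.
def mloop (g : List (List Char)) (distance : Int) : Nat → Int → Nat → Nat → Nat → Nat → Bool
  | 0, _, _, _, _, total => (total : Int) == distance
  | fuel + 1, ti, tj, bi, bj, total =>
    if 0 ≤ ti ∧ bi < g.length then
      if (total : Int) > distance then false
      -- a := grid[ti], b := grid[bi] (both in range on every reachable state)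
      else if tj = 0 ∧ bj = 0 ∧ ((g[ti.toNat]?).getD []) = ((g[bi]?).getD []) then
        mloop g distance fuel (ti - 1) 0 (bi + 1) 0 total
      else if ((g[ti.toNat]?).getD []).length ≤ tj then
        mloop g distance fuel (ti - 1) 0 bi bj total
      else if ((g[bi]?).getD []).length ≤ bj then
        mloop g distance fuel ti tj (bi + 1) 0 total
      else
        -- m = min(len(a)-tj, len(b)-bj); sa = a[tj:tj+m], sb = b[bj:bj+m] (slices with
        -- non-negative in-range bounds: drop/take is exact); sum(map(str.__ne__, sa, sb))
        -- is the mismatch count of the zipped segments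
        mloop g distance fuel ti
          (tj + min (((g[ti.toNat]?).getD []).length - tj) (((g[bi]?).getD []).length - bj)) bi
          (bj + min (((g[ti.toNat]?).getD []).length - tj) (((g[bi]?).getD []).length - bj))
          (if ((((g[ti.toNat]?).getD []).drop tj).take
                  (min (((g[ti.toNat]?).getD []).length - tj) (((g[bi]?).getD []).length - bj)))
              ≠ ((((g[bi]?).getD []).drop bj).take
                  (min (((g[ti.toNat]?).getD []).length - tj) (((g[bi]?).getD []).length - bj)))
           then total + (((((g[ti.toNat]?).getD []).drop tj).take
                  (min (((g[ti.toNat]?).getD []).length - tj)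
                    (((g[bi]?).getD []).length - bj))).zip
                ((((g[bi]?).getD []).drop bj).take
                  (min (((g[ti.toNat]?).getD []).length - tj)
                    (((g[bi]?).getD []).length - bj)))).countP (fun p => p.1 != p.2)
           else total)
    else (total : Int) == distance

def mloop_fuel (g : List (List Char)) : Nat := 2 * g.length + 2 * sumLen g + 1

-- the loop 'for i in range(len(grid)-1)' of has_horizontal_sym with early return
def loopB (g : List (List Char)) (distance : Int) : List Int → Bool × Int
  | [] => (false, 0)
  | i :: rest =>
      if mloop g distance (mloop_fuel g) i 0 (i.toNat + 1) 0 0 then (true, i + 1)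
      else loopB g distance rest

def has_horizontal_sym_alt (grid : List String) (distance : Int) : Bool × Int :=
  let g := grid.map String.toList
  loopB g distance (PySem.List.pyRange 0 ((g.length : Int) - 1) 1)

-- ===== PRECONDITION & SPEC =====
def Spec_has_horizontal_sym (grid : List String) (distance : Int) (out : Bool × Int) : Prop := out = has_horizontal_sym_alt grid distance
instance (grid : List String) (distance : Int) (out : Bool × Int) : Decidable (Spec_has_horizontal_sym grid distance out) := by unfold Spec_has_horizontal_sym; infer_instance

-- ===== CLAIM (what is proved, stated in full; the proofs are below) =====
def Claim_equal_has_horizontal_sym : Prop := ∀ (grid : List String) (distance : Int), Dom_has_horizontal_sym grid distance → Spec_has_horizontal_sym grid distance (has_horizontal_sym grid distance)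

-- ===== LEMMAS AND PROOFS =====

-- counting mismatching indices over equal-length lists is countP over the zip
lemma dChars_eq_of_len (a : List Char) : ∀ b : List Char, a.length = b.length →
    dChars a b = (((a.zip b).countP (fun p => p.1 != p.2) : Nat) : Int) := by
  induction a with
  | nil => intro b h; cases b <;> simp_all [dChars]
  | cons x xs ih =>
    intro b h
    cases b with
    | nil => simp at h
    | cons y ys =>
      have hlen : xs.length = ys.length := by simpa using h
      have ihx := ih ys hlen
      simp only [dChars, PySem.List.pyRange_zero_natCast] at ihx ⊢
      rw [List.length_cons, List.range_succ_eq_map]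
      simp only [List.map_cons, List.map_map, List.filter_cons, List.filter_map,
        Function.comp_def, List.zip_cons_cons, List.countP_cons]
      have h0 : (PySem.List.pyGet? (x :: xs) ((0:Nat):Int) != PySem.List.pyGet? (y :: ys) ((0:Nat):Int))
          = (x != y) := by simp [bne]
      have hs : ∀ k : Nat,
          (PySem.List.pyGet? (x :: xs) (((k+1:Nat)):Int) != PySem.List.pyGet? (y :: ys) (((k+1:Nat)):Int))
          = (PySem.List.pyGet? xs ((k:Nat):Int) != PySem.List.pyGet? ys ((k:Nat):Int)) := by
        intro k; simp [PySem.List.pyGet?_natCast]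
      simp only [List.filter_map, List.length_map, Function.comp_def] at ihx
      rw [h0]
      simp only [Nat.succ_eq_add_one, hs]
      split_ifs with hxy <;>
        simp only [List.length_cons, List.length_map] <;>
        (push_cast at ihx ⊢; omega)

-- zip already truncates to the common length
lemma zip_take_min (p s : List Char) :
    (p.take (min p.length s.length)).zip (s.take (min p.length s.length)) = p.zip s := by
  induction p generalizing s with
  | nil => simp
  | cons a as ih =>
    cases s with
    | nil => simp
    | cons b bs =>
      simp only [List.length_cons, Nat.succ_min_succ, List.take_succ_cons, List.zip_cons_cons]
      rw [ih bs]

-- the per-split condition of A equals countP-over-zip of the two halves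
lemma cond_eq (P S : List Char) :
    dChars (P.take (min P.length S.length)) (S.take (min P.length S.length))
      = (((P.zip S).countP (fun p => p.1 != p.2) : Nat) : Int) := by
  rw [dChars_eq_of_len _ _ (by simp only [List.length_take]; omega), zip_take_min]

-- a list zipped with itself has no mismatching pair
lemma countP_zip_self (l : List Char) : (l.zip l).countP (fun p => p.1 != p.2) = 0 := by
  induction l with
  | nil => simp
  | cons x xs ih => simp [ih]

lemma flat_rev_take_succ (g : List (List Char)) (k : Nat) :
    ((g.take (k + 1)).reverse).flatten = ((g[k]?).getD []) ++ ((g.take k).reverse).flatten := by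
  rw [List.take_add_one]; cases hx : g[k]? <;> simp [hx]

lemma flat_drop_succ (g : List (List Char)) (k : Nat) (hk : k < g.length) :
    (g.drop k).flatten = ((g[k]?).getD []) ++ (g.drop (k + 1)).flatten := by
  rw [List.drop_eq_getElem_cons hk, List.getElem?_eq_getElem hk]
  simp only [List.flatten_cons, Option.getD_some]

lemma sumLen_take_succ (g : List (List Char)) (k : Nat) :
    sumLen (g.take (k + 1)) = sumLen (g.take k) + ((g[k]?).getD []).length := by
  unfold sumLen; rw [List.take_add_one]; cases hx : g[k]? <;> simp [hx]

lemma sumLen_drop_succ (g : List (List Char)) (k : Nat) (hk : k < g.length) :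
    sumLen (g.drop k) = ((g[k]?).getD []).length + sumLen (g.drop (k + 1)) := by
  unfold sumLen
  rw [List.drop_eq_getElem_cons hk, List.getElem?_eq_getElem hk, List.map_cons, List.sum_cons]
  rfl

lemma sumLen_split (g : List (List Char)) (k : Nat) :
    sumLen (g.take k) + sumLen (g.drop k) = sumLen g := by
  conv_rhs => rw [← List.take_append_drop k g]
  simp [sumLen]

-- main invariant of the cursor loop: with enough fuel for the remaining work, mloop decides
-- whether total plus the mismatch count of the zip of the remaining top half (rows ti..0, row ti
-- entered at column tj) with the remaining bottom half (rows bi.., row bi entered at column bj)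
-- equals distance
lemma mloop_eq (g : List (List Char)) (distance : Int) :
    ∀ (fuel : Nat) (ti : Int) (tj bi bj total : Nat),
    (ti + 1).toNat + (g.length - bi)
      + (sumLen (g.take (ti + 1).toNat) - tj) + (sumLen (g.drop bi) - bj) ≤ fuel →
    ti < (g.length : Int) →
    tj ≤ ((g[ti.toNat]?).getD []).length →
    bj ≤ ((g[bi]?).getD []).length →
    mloop g distance fuel ti tj bi bj total
      = (((total + (((((g.take (ti + 1).toNat).reverse).flatten).drop tj).zip
          (((g.drop bi).flatten).drop bj)).countP (fun p => p.1 != p.2) : Nat) : Int) == distance) := by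
  intro fuel
  induction fuel with
  | zero =>
    intro ti tj bi bj total hf hti htj hbj
    have h0 : (ti + 1).toNat = 0 := by omega
    simp [mloop, h0]
  | succ fuel ih =>
    intro ti tj bi bj total hf hti htj hbj
    rw [mloop]
    by_cases hg : 0 ≤ ti ∧ bi < g.length
    · rw [if_pos hg]
      obtain ⟨h0, hbi⟩ := hg
      by_cases hcut : (total : Int) > distance
      · rw [if_pos hcut]
        refine (beq_eq_false_iff_ne.mpr ?_).symm
        push_cast at hcut ⊢
        omega
      rw [if_neg hcut]
      have h1 : (ti + 1).toNat = ti.toNat + 1 := by omega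
      have hts := sumLen_take_succ g ti.toNat
      have hds := sumLen_drop_succ g bi hbi
      rw [h1] at hf
      by_cases heq : tj = 0 ∧ bj = 0 ∧ ((g[ti.toNat]?).getD []) = ((g[bi]?).getD [])
      · rw [if_pos heq]
        obtain ⟨htj0, hbj0, hab⟩ := heq
        subst htj0; subst hbj0
        have h2 : (ti - 1 + 1).toNat = ti.toNat := by omega
        rw [ih (ti - 1) 0 (bi + 1) 0 total
          (by rw [h2]; have hab' : ((g[ti.toNat]?).getD []).length = ((g[bi]?).getD []).length :=
                by rw [hab]
              omega)
          (by omega) (by simp) (by simp)]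
        rw [h2, h1, flat_rev_take_succ, flat_drop_succ g bi hbi]
        rw [List.drop_zero, List.drop_zero, List.drop_zero, List.drop_zero, ← hab]
        rw [List.zip_append rfl, List.countP_append, countP_zip_self, Nat.zero_add]
      rw [if_neg heq]
      by_cases hta : ((g[ti.toNat]?).getD []).length ≤ tj
      · rw [if_pos hta]
        have htj' : tj = ((g[ti.toNat]?).getD []).length := le_antisymm htj hta
        have h2 : (ti - 1 + 1).toNat = ti.toNat := by omega
        rw [ih (ti - 1) 0 bi bj total (by rw [h2]; omega) (by omega) (by simp) hbj]
        rw [h1, flat_rev_take_succ, htj']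
        rw [List.drop_left' rfl, h2, List.drop_zero]
      · rw [if_neg hta]
        by_cases htb : ((g[bi]?).getD []).length ≤ bj
        · rw [if_pos htb]
          have hbj' : bj = ((g[bi]?).getD []).length := le_antisymm hbj htb
          rw [ih ti tj (bi + 1) 0 total (by rw [h1]; omega) hti htj (by simp)]
          rw [flat_drop_succ g bi hbi, hbj']
          rw [List.drop_left' rfl, List.drop_zero]
        · rw [if_neg htb]
          have hlta : tj < ((g[ti.toNat]?).getD []).length := by omega
          have hltb : bj < ((g[bi]?).getD []).length := by omega
          set m := min (((g[ti.toNat]?).getD []).length - tj)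
              (((g[bi]?).getD []).length - bj) with hmdef
          have hm : 1 ≤ m := by omega
          have hma : tj + m ≤ ((g[ti.toNat]?).getD []).length := by omega
          have hmb : bj + m ≤ ((g[bi]?).getD []).length := by omega
          rw [ih ti (tj + m) bi (bj + m) _ (by rw [h1]; omega) hti (by omega) (by omega)]
          have harg : (if (((g[ti.toNat]?).getD []).drop tj).take m
                  ≠ ((((g[bi]?).getD []).drop bj).take m)
               then total + ((((((g[ti.toNat]?).getD []).drop tj).take m)).zip
                    ((((g[bi]?).getD []).drop bj).take m)).countP (fun p => p.1 != p.2)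
               else total)
              = total + ((((((g[ti.toNat]?).getD []).drop tj).take m)).zip
                    ((((g[bi]?).getD []).drop bj).take m)).countP (fun p => p.1 != p.2) := by
            split_ifs with hne
            · rfl
            · have hseg := not_not.mp hne
              rw [hseg, countP_zip_self]
              omega
          rw [harg]
          rw [h1, flat_rev_take_succ, flat_drop_succ g bi hbi]
          rw [List.drop_append_of_le_length (by omega : tj ≤ ((g[ti.toNat]?).getD []).length),
              List.drop_append_of_le_length hma,
              List.drop_append_of_le_length (by omega : bj ≤ ((g[bi]?).getD []).length),
              List.drop_append_of_le_length hmb]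
          have hsplit1 : ((g[ti.toNat]?).getD []).drop tj
              = (((g[ti.toNat]?).getD []).drop tj).take m
                ++ ((g[ti.toNat]?).getD []).drop (tj + m) := by
            conv_lhs => rw [← List.take_append_drop m (((g[ti.toNat]?).getD []).drop tj)]
            rw [List.drop_drop]
          have hsplit2 : ((g[bi]?).getD []).drop bj
              = (((g[bi]?).getD []).drop bj).take m ++ ((g[bi]?).getD []).drop (bj + m) := by
            conv_lhs => rw [← List.take_append_drop m (((g[bi]?).getD []).drop bj)]
            rw [List.drop_drop]
          have hkey :
              ((((g[ti.toNat]?).getD []).drop tj ++ (g.take ti.toNat).reverse.flatten).zip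
                  (((g[bi]?).getD []).drop bj ++ (g.drop (bi + 1)).flatten)).countP
                    (fun p => p.1 != p.2)
                = (((((g[ti.toNat]?).getD []).drop tj).take m).zip
                      ((((g[bi]?).getD []).drop bj).take m)).countP (fun p => p.1 != p.2)
                  + ((((g[ti.toNat]?).getD []).drop (tj + m)
                        ++ (g.take ti.toNat).reverse.flatten).zip
                      (((g[bi]?).getD []).drop (bj + m)
                        ++ (g.drop (bi + 1)).flatten)).countP (fun p => p.1 != p.2) := by
            conv_lhs => rw [hsplit1, hsplit2]
            rw [List.append_assoc, List.append_assoc,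
              List.zip_append (by simp [List.length_take, List.length_drop]; omega),
              List.countP_append]
          rw [hkey, Nat.add_assoc]
    · rw [if_neg hg]
      rcases (not_and_or.mp hg) with h0 | hbi
      · have : (ti + 1).toNat = 0 := by omega
        simp [this]
      · have : g.drop bi = [] := List.drop_eq_nil_of_le (by omega)
        simp [this]

-- main loop invariant: entering iteration j, A's state is (reverse of first j rows joined, rest
-- joined); from there the two loops agree
lemma loop_eq (g : List (List Char)) (d : Int) :
    ∀ (k j : Nat), j + k = g.length →
      loopA g d (PySem.List.pyRange (j : Int) ((g.length : Int) - 1) 1)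
        ((g.take j).reverse.flatten) ((g.drop j).flatten)
      = loopB g d (PySem.List.pyRange (j : Int) ((g.length : Int) - 1) 1) := by
  intro k
  induction k with
  | zero =>
    intro j hj
    rw [PySem.List.pyRange_one_eq_nil (by omega)]
    simp [loopA, loopB]
  | succ k ih =>
    intro j hj
    by_cases hlast : k = 0
    · rw [PySem.List.pyRange_one_eq_nil (by omega)]
      simp [loopA, loopB]
    · have hjlt : j < g.length := by omega
      rw [PySem.List.pyRange_one_cons (by omega)]
      simp only [loopA, loopB]
      have hrow : (PySem.List.pyGet? g ((j:Nat):Int)).getD [] = g[j] := by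
        simp [List.getElem?_eq_getElem hjlt]
      have hpref : g[j] ++ (g.take j).reverse.flatten = (g.take (j+1)).reverse.flatten := by
        rw [List.take_add_one, List.getElem?_eq_getElem hjlt]
        simp only [Option.toList_some, List.reverse_append, List.reverse_cons, List.reverse_nil,
          List.nil_append, List.flatten_cons, List.cons_append]
      have hsuff : ((g.drop j).flatten).drop (g[j]).length = (g.drop (j+1)).flatten := by
        rw [List.drop_eq_getElem_cons hjlt, List.flatten_cons, List.drop_left]
      have hml := mloop_eq g d (mloop_fuel g) ((j:Nat):Int) 0 (((j:Nat):Int).toNat + 1) 0 0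
        (by
          simp only [Int.toNat_natCast]
          have hcast' : ((j:Int) + 1).toNat = j + 1 := by omega
          rw [hcast']
          have := sumLen_split g (j + 1)
          unfold mloop_fuel
          omega)
        (by push_cast; omega) (by omega) (by omega)
      simp only [Int.toNat_natCast] at hml
      have hcast : (((j:Nat):Int) + 1).toNat = j + 1 := by omega
      rw [hcast] at hml
      simp only [List.drop_zero, Nat.zero_add] at hml
      rw [hrow, hpref, hsuff, cond_eq]
      simp only [Int.toNat_natCast]
      simp only [hml, beq_iff_eq]
      split
      · rfl
      · have := ih (j+1) (by omega)
        push_cast at this ⊢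
        exact this

-- ===== VERDICT (by name: the statement is the Claim_ definition above) =====
theorem has_horizontal_sym_spec : Claim_equal_has_horizontal_sym := by
  intro grid distance _
  unfold Spec_has_horizontal_sym has_horizontal_sym has_horizontal_sym_alt
  have := loop_eq (grid.map String.toList) distance (grid.map String.toList).length 0 (by simp)
  simpa using this
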